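-- pv_equiv track=rewrite | github.com/sasen-git/vhh-designer | archive/designer/vhh_designer_v8_9.py | apply_motif
-- ===== SOURCE A (Python) =====
-- from typing import Dict, List, Tuple, Optional, Set, Any
--
-- def apply_motif(
--     positions: Dict[int, str],
--     motif: List[Tuple[int, str]]
-- ) -> Dict[int, str]:
--     """Apply a motif to positions dict."""
--     out = dict(positions)
--     for pos, aa in motif:
--         if pos in out:
--             out[pos] = aa
--     return out
-- ===== SOURCE B (Python) =====
-- def apply_motif(positions, motif):
--     """Apply a motif to positions dict."""
--     def last_override(pos, default):
--         # scan the motif back-to-front: the last entry for a position wins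
--         for p, aa in reversed(motif):
--             if p == pos:
--                 return aa
--         return default
--     return {pos: last_override(pos, aa) for pos, aa in positions.items()}
-- ===== Notes on version B (the rewrite author's own statement) =====
-- stated objective: alternative
-- what changed: B traverses positions once and resolves each position by a back-to-front scan of the motif list (last entry wins), building the result as a comprehension, instead of A's loop over motif with a membership test and in-place overwrite on a copy of positions; it trades A's dict copy/updates for an O(n*m) scan with no intermediate dict.
import Mathlib
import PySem

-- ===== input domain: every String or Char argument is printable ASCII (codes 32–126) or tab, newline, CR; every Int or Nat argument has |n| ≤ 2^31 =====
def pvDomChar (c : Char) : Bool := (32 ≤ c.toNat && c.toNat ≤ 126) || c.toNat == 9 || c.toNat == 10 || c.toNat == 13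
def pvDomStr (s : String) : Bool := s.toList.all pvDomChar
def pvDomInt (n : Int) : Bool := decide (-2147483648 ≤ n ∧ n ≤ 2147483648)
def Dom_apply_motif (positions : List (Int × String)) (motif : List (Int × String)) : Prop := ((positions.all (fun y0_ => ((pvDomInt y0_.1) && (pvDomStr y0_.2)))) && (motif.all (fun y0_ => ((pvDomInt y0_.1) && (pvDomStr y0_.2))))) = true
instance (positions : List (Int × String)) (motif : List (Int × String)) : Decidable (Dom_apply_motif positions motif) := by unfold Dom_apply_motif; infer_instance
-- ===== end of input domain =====

-- B resolves each position by a back-to-front scan of the motif list (last match wins),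
-- with no intermediate dict; same result, different traversal (objective: alternative).

-- ===== PORT A =====
-- out = dict(positions); for pos, aa in motif: if pos in out: out[pos] = aa; return out
def apply_motif (positions : List (Int × String)) (motif : List (Int × String)) : List (Int × String) :=
  let out := PySem.Dict.ofList positions
  (motif.foldl (fun out p => if out.contains p.1 then out.insert p.1 p.2 else out) out).items

-- ===== PORT B =====
-- for p, aa in reversed(motif): if p == pos: return aa; return default
def pvLastOverride : List (Int × String) → Int → String → String
  | [], _, dflt => dflt
  | (p, aa) :: rest, pos, dflt => if p = pos then aa else pvLastOverride rest pos dflt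

-- {pos: last_override(pos, aa) for pos, aa in positions.items()} — the source keys
-- (a dict's items) are distinct, so the dict comprehension is exactly this map.
def apply_motif_alt (positions : List (Int × String)) (motif : List (Int × String)) : List (Int × String) :=
  ((PySem.Dict.ofList positions).items).map
    (fun q => (q.1, pvLastOverride motif.reverse q.1 q.2))

-- ===== PRECONDITION & SPEC =====
def Spec_apply_motif (positions : List (Int × String)) (motif : List (Int × String)) (out : List (Int × String)) : Prop := out = apply_motif_alt positions motif
instance (positions : List (Int × String)) (motif : List (Int × String)) (out : List (Int × String)) : Decidable (Spec_apply_motif positions motif out) := by unfold Spec_apply_motif; infer_instance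

-- ===== CLAIM (what is proved, stated in full; the proofs are below) =====
def Claim_equal_apply_motif : Prop := ∀ (positions : List (Int × String)) (motif : List (Int × String)), Dom_apply_motif positions motif → Spec_apply_motif positions motif (apply_motif positions motif)

-- ===== LEMMAS AND PROOFS =====

-- dict(m) built on top of d looks up like dict(m) with d's value as the fallback
theorem getD_foldl_insert_ofList (m : List (Int × String)) (d : PySem.Dict Int String)
    (j : Int) (dflt : String) :
    (m.foldl (fun d p => d.insert p.1 p.2) d).getD j dflt
      = (PySem.Dict.ofList m).getD j (d.getD j dflt) := by
  induction m generalizing d dflt with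
  | nil => simp [PySem.Dict.ofList, PySem.Dict.update]
  | cons hd tl ih =>
    have hof : PySem.Dict.ofList (hd :: tl)
        = tl.foldl (fun d p => d.insert p.1 p.2) (PySem.Dict.empty.insert hd.1 hd.2) := by
      simp [PySem.Dict.ofList, PySem.Dict.update]
    rw [hof, List.foldl_cons, ih, ih]
    simp [PySem.Dict.getD_insert]

theorem getD_ofList_cons (hd : Int × String) (tl : List (Int × String)) (j : Int) (dflt : String) :
    (PySem.Dict.ofList (hd :: tl)).getD j dflt
      = (PySem.Dict.ofList tl).getD j (if j = hd.1 then hd.2 else dflt) := by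
  have hof : PySem.Dict.ofList (hd :: tl)
      = tl.foldl (fun d p => d.insert p.1 p.2) (PySem.Dict.empty.insert hd.1 hd.2) := by
    simp [PySem.Dict.ofList, PySem.Dict.update]
  rw [hof, getD_foldl_insert_ofList]
  simp [PySem.Dict.getD_insert]

-- A's conditional-override loop over `motif` rewrites each existing item to its
-- last motif value (default: the old value), keeping keys and order.
theorem items_motif_loop (m : List (Int × String)) (d : PySem.Dict Int String)
    (hnd : d.keys.Nodup) :
    (m.foldl (fun out p => if out.contains p.1 then out.insert p.1 p.2 else out) d).items
      = d.items.map (fun p => (p.1, (PySem.Dict.ofList m).getD p.1 p.2)) := by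
  induction m generalizing d with
  | nil =>
    simp [PySem.Dict.ofList, PySem.Dict.update, PySem.Dict.getD_empty]
  | cons hd tl ih =>
    rw [List.foldl_cons]
    by_cases hc : d.contains hd.1 = true
    · rw [if_pos hc, ih _ (PySem.Dict.nodup_keys_insert _ _ _ hnd),
        PySem.Dict.items_insert_of_contains _ _ hc, List.map_map]
      apply List.map_congr_left
      intro p _
      rw [getD_ofList_cons]
      by_cases hk : p.1 = hd.1 <;> simp [hk, Function.comp]
    · rw [if_neg hc, ih _ hnd]
      apply List.map_congr_left
      intro p hp
      have hpk : p.1 ≠ hd.1 := by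
        intro h
        have := PySem.Dict.mem_keys_of_mem_items _ hp
        rw [h] at this
        rw [← PySem.Dict.contains_iff_mem_keys] at this
        exact hc this
      rw [getD_ofList_cons, if_neg hpk]

-- the back-to-front scan absorbs a trailing element into the default
theorem pvLastOverride_append_single (l : List (Int × String)) (hd : Int × String)
    (j : Int) (dflt : String) :
    pvLastOverride (l ++ [hd]) j dflt
      = pvLastOverride l j (if j = hd.1 then hd.2 else dflt) := by
  induction l with
  | nil =>
    by_cases h : hd.1 = j
    · simp [pvLastOverride, h]
    · simp only [List.nil_append, pvLastOverride, if_neg h]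
      rw [if_neg (fun hj => h hj.symm)]
  | cons x xs ih =>
    by_cases h : x.1 = j <;> simp [pvLastOverride, h, ih]

-- dict(m) lookup equals the reversed linear scan
theorem getD_ofList_eq_pvLastOverride (m : List (Int × String)) (j : Int) (dflt : String) :
    (PySem.Dict.ofList m).getD j dflt = pvLastOverride m.reverse j dflt := by
  induction m generalizing dflt with
  | nil => simp [PySem.Dict.ofList, PySem.Dict.update, PySem.Dict.getD_empty, pvLastOverride]
  | cons hd tl ih =>
    rw [getD_ofList_cons, ih, List.reverse_cons, pvLastOverride_append_single]

-- ===== VERDICT (by name: the statement is the Claim_ definition above) =====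
theorem apply_motif_spec : Claim_equal_apply_motif := by
  intro positions motif _
  unfold Spec_apply_motif apply_motif apply_motif_alt
  rw [items_motif_loop motif (PySem.Dict.ofList positions) (PySem.Dict.nodup_keys_ofList _)]
  apply List.map_congr_left
  intro p _
  rw [getD_ofList_eq_pvLastOverride]
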